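-- pv_equiv track=rewrite | github.com/fr4iser90/nixos-jetson-orin-nano | examples/agent-layer/docker/app/plugins/web_search.py | _hostname_matches_allowlist
-- ===== SOURCE A (Python) =====
-- def _hostname_matches_allowlist(host: str, allow: frozenset[str]) -> bool:
--     h = host.lower().rstrip(".")
--     if not h:
--         return False
--     if h in allow:
--         return True
--     for d in allow:
--         if h.endswith("." + d):
--             return True
--     return False
-- ===== SOURCE B (Python) =====
-- def _hostname_matches_allowlist(host: str, allow) -> bool:
--     h = host.lower().rstrip(".")
--     if not h:
--         return False
--     s = set(allow)
--     if h in s: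
--         return True
--     for i, c in enumerate(h):
--         if c == "." and h[i + 1:] in s:
--             return True
--     return False
-- ===== Notes on version B (the rewrite author's own statement) =====
-- stated objective: alternative
-- what changed: Instead of scanning the whole allowlist and testing endswith('.'+d) for every entry, B builds a set of the allowlist once and enumerates the host's own dot positions, testing each parent-domain suffix by set membership.
import Mathlib
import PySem

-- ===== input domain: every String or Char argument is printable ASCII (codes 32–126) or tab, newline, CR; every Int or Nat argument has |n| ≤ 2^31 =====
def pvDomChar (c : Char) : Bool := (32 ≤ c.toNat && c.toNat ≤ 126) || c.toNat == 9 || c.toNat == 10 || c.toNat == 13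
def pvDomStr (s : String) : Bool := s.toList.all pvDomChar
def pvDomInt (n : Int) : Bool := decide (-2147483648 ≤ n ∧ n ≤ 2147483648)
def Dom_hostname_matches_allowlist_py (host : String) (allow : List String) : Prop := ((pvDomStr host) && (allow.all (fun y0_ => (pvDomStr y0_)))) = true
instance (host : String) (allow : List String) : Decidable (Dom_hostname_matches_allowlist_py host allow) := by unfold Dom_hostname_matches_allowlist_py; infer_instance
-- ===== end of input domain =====

-- B replaces A's scan over the whole allowlist (endswith per entry) by one set built
-- from the allowlist plus a scan over the host's own dot positions: membership tests on the host's parent-domain suffixes instead of endswith tests per allowlist entry.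

-- host.lower().rstrip("."): drop trailing '.' characters (hand port, exact: rstrip with an
-- explicit chars argument removes exactly the trailing characters from that set)
def pvRstripDots (cs : List Char) : List Char := (cs.reverse.dropWhile (fun c => c == '.')).reverse

-- ===== PORT A =====
def hostname_matches_allowlist_py (host : String) (allow : List String) : Bool :=
  let h := pvRstripDots (PySem.Chars.lower host.toList)
  if h = [] then false
  else if allow.contains (String.ofList h) then true
  else allow.any (fun d => PySem.Chars.endswith h ('.' :: d.toList))

-- ===== PORT B =====
def hostname_matches_allowlist_py_alt (host : String) (allow : List String) : Bool :=
  let h := pvRstripDots (PySem.Chars.lower host.toList)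
  if h = [] then false
  else
    let s : PySem.Set String := PySem.Set.ofList allow
    if PySem.Set.contains s (String.ofList h) then true
    else (PySem.List.enumerate h 0).any
      (fun p => p.2 == '.' && PySem.Set.contains s (String.ofList (PySem.List.slice h (some (p.1 + 1)) none)))

-- ===== PRECONDITION & SPEC =====
def Spec_hostname_matches_allowlist_py (host : String) (allow : List String) (out : Bool) : Prop := out = hostname_matches_allowlist_py_alt host allow
instance (host : String) (allow : List String) (out : Bool) : Decidable (Spec_hostname_matches_allowlist_py host allow out) := by unfold Spec_hostname_matches_allowlist_py; infer_instance

-- ===== CLAIM (what is proved, stated in full; the proofs are below) =====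
def Claim_equal_hostname_matches_allowlist_py : Prop := ∀ (host : String) (allow : List String), Dom_hostname_matches_allowlist_py host allow → Spec_hostname_matches_allowlist_py host allow (hostname_matches_allowlist_py host allow)

-- ===== LEMMAS AND PROOFS =====

lemma pv_set_contains (allow : List String) (x : String) :
    PySem.Set.contains (PySem.Set.ofList allow) x = allow.contains x := by
  rw [Bool.eq_iff_iff, PySem.Set.contains_iff, PySem.Set.mem_ofList, List.contains_iff_mem]

-- ('.' :: l) is a suffix of h  ↔  some index k has h[k] = '.' and the rest after k equals l
lemma pv_dot_suffix_iff (h : List Char) (l : List Char) :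
    ('.' :: l) <:+ h ↔ ∃ k : Nat, ∃ hk : k < h.length, h[k] = '.' ∧ h.drop (k + 1) = l := by
  constructor
  · rintro ⟨t, rfl⟩
    refine ⟨t.length, by simp, ?_, ?_⟩
    · simp
    · rw [show t ++ '.' :: l = (t ++ ['.']) ++ l by simp, show t.length + 1 = (t ++ ['.']).length by simp, List.drop_left]
  · rintro ⟨k, hk, hdot, hdrop⟩
    refine ⟨h.take k, ?_⟩
    have := List.take_append_drop k h
    rw [List.drop_eq_getElem_cons hk, hdot, hdrop] at this
    exact this

-- A's allowlist scan equals B's scan over the host's dot positions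
lemma pv_any_eq (h : List Char) (allow : List String) :
    allow.any (fun d => PySem.Chars.endswith h ('.' :: d.toList)) =
    (PySem.List.enumerate h 0).any
      (fun p => p.2 == '.' && PySem.Set.contains (PySem.Set.ofList allow) (String.ofList (PySem.List.slice h (some (p.1 + 1)) none))) := by
  rw [Bool.eq_iff_iff, List.any_eq_true, List.any_eq_true]
  constructor
  · rintro ⟨d, hd, hend⟩
    obtain ⟨k, hk, hdot, hdrop⟩ := (pv_dot_suffix_iff h d.toList).1 ((PySem.Chars.endswith_iff _ _).1 hend)
    refine ⟨(k, h[k]), (PySem.List.mem_enumerate_iff _ _ _).2 ⟨k, hk, by simp⟩, ?_⟩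
    have hsl : PySem.List.slice h (some ((k : Int) + 1)) none = h.drop (k + 1) := by
      have he : ((k : Int) + 1) = ((k + 1 : Nat) : Int) := by push_cast; ring
      rw [he, PySem.List.slice_from]
      · simp
      · omega
    simp only [hsl, hdot, hdrop, beq_self_eq_true, Bool.true_and]
    rw [pv_set_contains]
    simpa using hd
  · rintro ⟨p, hp, hcond⟩
    obtain ⟨k, hk, rfl⟩ := (PySem.List.mem_enumerate_iff _ _ _).1 hp
    simp only [Bool.and_eq_true, beq_iff_eq] at hcond
    obtain ⟨hdot, hmem⟩ := hcond
    have hsl : PySem.List.slice h (some ((0 : Int) + k + 1)) none = h.drop (k + 1) := by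
      have he : ((0 : Int) + k + 1) = ((k + 1 : Nat) : Int) := by push_cast; ring
      rw [he, PySem.List.slice_from]
      · simp
      · omega
    rw [hsl, pv_set_contains, List.contains_iff_mem] at hmem
    refine ⟨String.ofList (h.drop (k + 1)), hmem, ?_⟩
    rw [PySem.Chars.endswith_iff]
    exact (pv_dot_suffix_iff h _).2 ⟨k, hk, hdot, by simp⟩

-- ===== VERDICT (by name: the statement is the Claim_ definition above) =====
theorem hostname_matches_allowlist_py_spec : Claim_equal_hostname_matches_allowlist_py := by
  intro host allow _
  unfold Spec_hostname_matches_allowlist_py hostname_matches_allowlist_py hostname_matches_allowlist_py_alt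
  simp only []
  set h := pvRstripDots (PySem.Chars.lower host.toList) with hh
  by_cases he : h = []
  · simp [he]
  · simp only [he, if_false, pv_set_contains, pv_any_eq]
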